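-- pv_equiv track=rewrite | github.com/PaulaRomano-fiuba/TP1-TDA | Mediciones/graficos_informe.py | tiempo_minimo
-- ===== SOURCE A (Python) =====
-- def tiempo_minimo(rivales):
--     rivales_ordenados = sorted(rivales, key=lambda x: x[1], reverse=True)
--     tiempo_scaloni = 0
--     tiempo_total = 0
--     for s_i, a_i in rivales_ordenados:
--         tiempo_scaloni += s_i
--         final = tiempo_scaloni + a_i
--         tiempo_total = max(tiempo_total, final)
--     return rivales_ordenados, tiempo_total
-- ===== SOURCE B (Python) =====
-- def tiempo_minimo(rivales):
--     rivales_ordenados = sorted(rivales, key=lambda x: x[1], reverse=True)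
--     if not rivales_ordenados:
--         return rivales_ordenados, 0
--     # back-to-front: peor = worst final time of the suffix seen so far,
--     # measured relative to the moment that suffix starts; shifting by s
--     # replaces A's running prefix sum.
--     peor = None
--     for s, a in reversed(rivales_ordenados):
--         peor = s + a if peor is None else max(s + a, s + peor)
--     return rivales_ordenados, max(0, peor)
-- ===== Notes on version B (the rewrite author's own statement) =====
-- stated objective: alternative
-- what changed: Replaces A's forward pass with two running accumulators (prefix time and running max) by a backward pass with a single accumulator: the worst final time of the suffix relative to its start, shifted by each s, clamped once at 0 at the end.
import Mathlib
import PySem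

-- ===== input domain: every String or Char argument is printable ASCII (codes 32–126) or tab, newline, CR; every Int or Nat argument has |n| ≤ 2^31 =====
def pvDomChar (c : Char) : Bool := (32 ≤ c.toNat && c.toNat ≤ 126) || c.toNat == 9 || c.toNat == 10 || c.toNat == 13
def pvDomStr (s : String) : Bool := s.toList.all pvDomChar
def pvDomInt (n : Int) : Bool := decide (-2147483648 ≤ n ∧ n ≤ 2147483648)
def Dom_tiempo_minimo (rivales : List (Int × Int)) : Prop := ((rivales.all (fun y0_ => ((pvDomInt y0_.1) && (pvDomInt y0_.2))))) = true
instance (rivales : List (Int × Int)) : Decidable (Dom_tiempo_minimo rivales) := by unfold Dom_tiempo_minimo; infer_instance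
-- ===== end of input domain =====

-- B replaces A's forward two-accumulator pass by a backward single-accumulator pass (alternative decomposition, same cost).


-- ===== PORT A =====
def tiempo_minimo (rivales : List (Int × Int)) : (List (Int × Int)) × Int :=
  let rivales_ordenados := PySem.List.sorted rivales (key := fun x => x.2) (reverse := true)
  let st := rivales_ordenados.foldl
    (fun (st : Int × Int) (p : Int × Int) =>
      let tiempo_scaloni := st.1 + p.1
      let final := tiempo_scaloni + p.2
      (tiempo_scaloni, max st.2 final)) (0, 0)
  (rivales_ordenados, st.2)

-- ===== PORT B =====
-- the loop body of Source B: peor = s + a if peor is None else max(s + a, s + peor)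
def pasoPeor (peor : Option Int) (p : Int × Int) : Option Int :=
  match peor with
  | none => some (p.1 + p.2)
  | some v => some (max (p.1 + p.2) (p.1 + v))

def tiempo_minimo_alt (rivales : List (Int × Int)) : (List (Int × Int)) × Int :=
  let rivales_ordenados := PySem.List.sorted rivales (key := fun x => x.2) (reverse := true)
  if rivales_ordenados.isEmpty then (rivales_ordenados, 0)
  else
    let peor := rivales_ordenados.reverse.foldl pasoPeor none
    -- the loop ran at least once, so peor is `some`; getD 0 is unreachable junk
    (rivales_ordenados, max 0 (peor.getD 0))

-- ===== PRECONDITION & SPEC =====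
def Spec_tiempo_minimo (rivales : List (Int × Int)) (out : (List (Int × Int)) × Int) : Prop := out = tiempo_minimo_alt rivales
instance (rivales : List (Int × Int)) (out : (List (Int × Int)) × Int) : Decidable (Spec_tiempo_minimo rivales out) := by unfold Spec_tiempo_minimo; infer_instance

-- ===== CLAIM (what is proved, stated in full; the proofs are below) =====
def Claim_equal_tiempo_minimo : Prop := ∀ (rivales : List (Int × Int)), Dom_tiempo_minimo rivales → Spec_tiempo_minimo rivales (tiempo_minimo rivales)

-- ===== LEMMAS AND PROOFS =====

-- proof-side characterisation of B's backward loop: the worst final time of a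
-- nonempty suffix, measured relative to the moment the suffix starts.
def peor_final : List (Int × Int) → Int
  | [] => 0
  | [(s, a)] => s + a
  | (s, a) :: resto => max (s + a) (s + peor_final resto)

-- A's fold, started at (ts, tt), ends with running max = max tt (ts + peor_final l) on nonempty l.
lemma foldA_snd (l : List (Int × Int)) : ∀ ts tt : Int,
    (l.foldl (fun (st : Int × Int) (p : Int × Int) =>
        (st.1 + p.1, max st.2 (st.1 + p.1 + p.2))) (ts, tt)).2
      = if l.isEmpty then tt else max tt (ts + peor_final l) := by
  induction l with
  | nil => intro ts tt; simp
  | cons p t ih =>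
    intro ts tt
    obtain ⟨s, a⟩ := p
    cases t with
    | nil => simp [peor_final]; omega
    | cons q r =>
      have h := ih (ts + s) (max tt (ts + s + a))
      simp only [List.foldl_cons] at h ⊢
      rw [h]
      simp only [peor_final, List.isEmpty_cons]
      simp only [Bool.false_eq_true, if_false]
      omega

-- B's backward loop computes peor_final on a nonempty list.
lemma foldB (l : List (Int × Int)) (hl : l ≠ []) :
    l.reverse.foldl pasoPeor none = some (peor_final l) := by
  induction l with
  | nil => exact absurd rfl hl
  | cons p t ih =>
    cases t with
    | nil =>
      obtain ⟨s, a⟩ := p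
      simp [pasoPeor, peor_final]
    | cons q r =>
      obtain ⟨s, a⟩ := p
      rw [List.reverse_cons, List.foldl_append, ih (by simp)]
      simp [pasoPeor, peor_final]

-- ===== VERDICT (by name: the statement is the Claim_ definition above) =====
theorem tiempo_minimo_spec : Claim_equal_tiempo_minimo := by
  intro rivales _
  unfold Spec_tiempo_minimo tiempo_minimo tiempo_minimo_alt
  simp only []
  cases hord : PySem.List.sorted rivales (key := fun x => x.2) (reverse := true) with
  | nil => simp
  | cons p t =>
    have h := foldA_snd (p :: t) 0 0
    simp only [List.isEmpty_cons, Bool.false_eq_true, if_false, zero_add] at h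
    rw [h, foldB (p :: t) (by simp)]
    simp
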